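-- pv_equiv track=rewrite | github.com/Jihyun0522/Algorithm | 프로그래머스/0/181854. 배열의 길이에 따라 다른 연산하기/배열의 길이에 따라 다른 연산하기.py | solution
-- ===== SOURCE A (Python) =====
-- def solution(arr, n):
--     L = len(arr)
--     is_odd_length = L % 2 != 0
--
--     return [
--         val + n
--         if (is_odd_length and i % 2 == 0) or (not is_odd_length and i % 2 != 0)
--         else val
--         for i, val in enumerate(arr)
--     ];
-- ===== SOURCE B (Python) =====
-- def solution(arr, n):
--     start = 0 if len(arr) % 2 else 1
--     result = list(arr)
--     result[start::2] = [v + n for v in result[start::2]]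
--     return result
-- ===== Notes on version B (the rewrite author's own statement) =====
-- stated objective: idiomatic
-- what changed: Replaces the per-element parity branch inside an enumerate-comprehension by computing the single target offset once and assigning n-shifted values to the strided slice result[start::2].
import Mathlib
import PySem

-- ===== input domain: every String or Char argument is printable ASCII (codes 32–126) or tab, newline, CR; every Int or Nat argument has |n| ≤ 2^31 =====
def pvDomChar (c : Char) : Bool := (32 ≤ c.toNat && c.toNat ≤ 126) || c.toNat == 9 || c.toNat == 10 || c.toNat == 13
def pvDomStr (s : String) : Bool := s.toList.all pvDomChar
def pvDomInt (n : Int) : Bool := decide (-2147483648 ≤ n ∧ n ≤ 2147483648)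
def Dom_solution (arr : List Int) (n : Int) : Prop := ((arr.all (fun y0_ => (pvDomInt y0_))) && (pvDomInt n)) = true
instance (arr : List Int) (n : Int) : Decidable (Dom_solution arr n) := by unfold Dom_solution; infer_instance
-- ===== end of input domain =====

-- B computes the single target offset once and updates only the strided slice arr[start::2]; same O(n) cost, plainer shape.

-- ===== PORT A =====
def solution (arr : List Int) (n : Int) : List Int :=
  let L : Int := arr.length
  let isOddLength : Bool := PySem.Int.mod L 2 != 0
  (PySem.List.enumerate arr).map (fun iv =>
    if (isOddLength && (PySem.Int.mod iv.1 2 == 0)) ||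
       (!isOddLength && (PySem.Int.mod iv.1 2 != 0))
    then iv.2 + n else iv.2)

-- ===== PORT B =====
-- arr[start::2] read: every second element
def every2 : List Int → List Int
  | [] => []
  | [x] => [x]
  | x :: _ :: t => x :: every2 t

-- arr[start::2] = vs write-back: put vs at the even positions
def write2 : List Int → List Int → List Int
  | [], _ => []
  | xs, [] => xs
  | [_], v :: _ => [v]
  | _ :: y :: t, v :: vs => v :: y :: write2 t vs

def solution_alt (arr : List Int) (n : Int) : List Int :=
  let start : Nat := if PySem.Int.mod (arr.length : Int) 2 != 0 then 0 else 1
  let upd := (every2 (arr.drop start)).map (· + n)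
  arr.take start ++ write2 (arr.drop start) upd

-- ===== PRECONDITION & SPEC =====
def Spec_solution (arr : List Int) (n : Int) (out : List Int) : Prop := out = solution_alt arr n
instance (arr : List Int) (n : Int) (out : List Int) : Decidable (Spec_solution arr n out) := by unfold Spec_solution; infer_instance

-- ===== CLAIM (what is proved, stated in full; the proofs are below) =====
def Claim_equal_solution : Prop := ∀ (arr : List Int) (n : Int), Dom_solution arr n → Spec_solution arr n (solution arr n)

-- ===== LEMMAS AND PROOFS =====

/-- Alternate add: add n at the head iff `b`, flipping each step. -/
def addAlt (b : Bool) (n : Int) : List Int → List Int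
  | [] => []
  | x :: t => (if b then x + n else x) :: addAlt (!b) n t

lemma write2_every2_map (n : Int) : ∀ xs : List Int,
    write2 xs ((every2 xs).map (· + n)) = addAlt true n xs := by
  intro xs
  induction xs using every2.induct with
  | case1 => simp [write2, addAlt]
  | case2 x => simp [every2, write2, addAlt]
  | case3 x y t ih => simp [every2, write2, addAlt, ih]

lemma mod_two_flip (s : Int) : PySem.Int.mod (s + 1) 2 = 1 - PySem.Int.mod s 2 := by
  rw [PySem.Int.mod_eq_emod_of_pos (by omega : (0:Int) < 2),
      PySem.Int.mod_eq_emod_of_pos (by omega : (0:Int) < 2)]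
  omega

lemma enumMap_even (n : Int) : ∀ (xs : List Int) (s : Int),
    (PySem.List.enumerate xs s).map
      (fun iv : Int × Int => if PySem.Int.mod iv.1 2 == 0 then iv.2 + n else iv.2)
    = addAlt (PySem.Int.mod s 2 == 0) n xs := by
  intro xs
  induction xs with
  | nil => intro s; simp [PySem.List.enumerate_nil, addAlt]
  | cons x t ih =>
    intro s
    rw [PySem.List.enumerate_cons, List.map_cons, ih (s + 1), mod_two_flip]
    rcases PySem.Int.mod_two_eq s with h | h <;> rw [h] <;> simp [addAlt]

lemma enumMap_ne (n : Int) : ∀ (xs : List Int) (s : Int),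
    (PySem.List.enumerate xs s).map
      (fun iv : Int × Int => if PySem.Int.mod iv.1 2 != 0 then iv.2 + n else iv.2)
    = addAlt (PySem.Int.mod s 2 != 0) n xs := by
  intro xs
  induction xs with
  | nil => intro s; simp [PySem.List.enumerate_nil, addAlt]
  | cons x t ih =>
    intro s
    rw [PySem.List.enumerate_cons, List.map_cons, ih (s + 1), mod_two_flip]
    rcases PySem.Int.mod_two_eq s with h | h <;> rw [h] <;> simp [addAlt]

lemma mod_len_two (L : Nat) : PySem.Int.mod (L : Int) 2 = ((L % 2 : Nat) : Int) := by
  exact_mod_cast PySem.Int.mod_natCast L 2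

theorem solution_eq_alt (arr : List Int) (n : Int) : solution arr n = solution_alt arr n := by
  unfold solution solution_alt
  simp only [mod_len_two]
  rcases Nat.even_or_odd arr.length with h | h
  · -- even length: A adds at odd indices, B starts at 1
    have hm : arr.length % 2 = 0 := Nat.even_iff.mp h
    simp only [hm, Nat.cast_zero, bne_self_eq_false, Bool.false_and, Bool.not_false,
      Bool.true_and, Bool.false_or, Bool.false_eq_true, reduceIte]
    cases arr with
    | nil => simp [PySem.List.enumerate_nil, write2]
    | cons x t =>
      rw [PySem.List.enumerate_cons, List.map_cons]
      have h0 : (PySem.Int.mod (0:Int) 2 != 0) = false := by decide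
      have h1 : (PySem.Int.mod (0+1:Int) 2 != 0) = true := by decide
      rw [enumMap_ne n t (0 + 1), h1]
      simp only [h0, Bool.false_eq_true, reduceIte, List.take_succ_cons, List.take_zero,
        List.drop_succ_cons, List.drop_zero, List.singleton_append]
      rw [write2_every2_map]
  · -- odd length: A adds at even indices, B starts at 0
    have hm : arr.length % 2 = 1 := Nat.odd_iff.mp h
    have hb : (((arr.length % 2 : Nat) : Int) != 0) = true := by rw [hm]; decide
    simp only [hb, Bool.true_and, Bool.not_true, Bool.false_and, Bool.or_false, if_pos, List.take_zero, List.drop_zero, List.nil_append]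
    have h0 : (PySem.Int.mod (0:Int) 2 == 0) = true := by decide
    rw [enumMap_even n arr 0, h0, write2_every2_map]

-- ===== VERDICT (by name: the statement is the Claim_ definition above) =====
theorem solution_spec : Claim_equal_solution := by
  intro arr n _
  unfold Spec_solution
  exact solution_eq_alt arr n
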